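-- pv_equiv track=rewrite | github.com/btakli/COMP-472-Mini-Project-2 | src/utils/BoardReader.py | _get_fuel_dict
-- ===== SOURCE A (Python) =====
-- def _get_fuel_dict(fuel_string: str, carlist: str) -> dict:
--     '''Gets the fuel levels from the fuel string for each car, returns a dictionary of car: fuel. If car is not in fuelstring, assume it has 100 fuel
--
--         fuel_string: String of fuel levels for each car
--         carlist: List of cars on the board'''
--     fuel_levels = {}
--     if fuel_string != "":  # If there is a fuel string, get the fuel levels
--         fuel_list = fuel_string.split(" ")
--         for fuel in fuel_list:
--             car = fuel[0]
--             fuel_level = fuel[1:]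
--             if len(fuel_level) == 0:  # If we have just a char with no number, assume 100 fuel
--                 fuel_level = 100
--
--             fuel_levels[car] = int(fuel_level)
--
--     # Check if any cars are missing from the fuel string, if so, assume they have 100 fuel
--     for car in carlist:
--         if car not in fuel_levels.keys():
--             fuel_levels[car] = 100
--
--     return fuel_levels
-- ===== SOURCE B (Python) =====
-- def _get_fuel_dict(fuel_string: str, carlist: str) -> dict:
--     '''Alternative decomposition: first fix the key order (cars from the fuel
--     string, then the remaining cars of the board), then compute each car's fuel
--     with a pure lookup: last token naming the car wins, default is 100.'''
--     tokens = fuel_string.split(" ") if fuel_string != "" else []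
--     cars = [t[0] for t in tokens]
--
--     keys = []
--     for c in cars + list(carlist):
--         if c not in keys:
--             keys.append(c)
--
--     def value(c):
--         if c not in cars:
--             return 100
--         t = next(u for u in reversed(tokens) if u[0] == c)
--         return int(t[1:]) if len(t) > 1 else 100
--
--     return {c: value(c) for c in keys}
-- ===== Notes on version B (the rewrite author's own statement) =====
-- stated objective: alternative
-- what changed: Instead of A's two dict-mutation passes (insert/overwrite tokens, then backfill missing cars behind a membership test), B fixes the deduplicated key order up front and computes each car's fuel with a pure lookup: last fuel-string token naming the car wins, default 100.
import Mathlib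
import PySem

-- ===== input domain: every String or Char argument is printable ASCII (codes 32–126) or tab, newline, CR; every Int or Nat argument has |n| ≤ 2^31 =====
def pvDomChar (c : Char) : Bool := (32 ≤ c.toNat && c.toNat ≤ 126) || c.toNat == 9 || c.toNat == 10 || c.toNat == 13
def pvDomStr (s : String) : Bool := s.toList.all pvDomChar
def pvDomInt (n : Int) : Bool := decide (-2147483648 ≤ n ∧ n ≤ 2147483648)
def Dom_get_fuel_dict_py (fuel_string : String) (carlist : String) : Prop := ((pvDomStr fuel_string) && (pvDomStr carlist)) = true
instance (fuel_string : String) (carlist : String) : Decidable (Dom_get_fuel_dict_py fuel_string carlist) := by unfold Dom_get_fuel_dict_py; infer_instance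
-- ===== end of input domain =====

-- B replaces A's two mutation passes over a dict (overwrite, then backfill-missing) by fixing the
-- deduplicated key order first and computing each car's fuel with a pure last-token lookup (objective: alternative).

-- a one-character Python string (a char of carlist, or token[0])
def chKey (c : Char) : String := String.ofList [c]

-- token[0] as a 1-char string; the [] branch is where Python raises IndexError (excluded by Pre_)
def tokCar (t : List Char) : String :=
  match t with
  | [] => ""
  | c :: _ => String.ofList [c]

-- 100 if the token is a bare car letter, else int(token[1:]); .getD 0 is where Python raises ValueError (excluded by Pre_)
def tokVal (t : List Char) : Int :=
  if t.drop 1 = [] then 100 else (PySem.Int.ofChars? (t.drop 1)).getD 0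

-- ===== PORT A =====
def get_fuel_dict_py (fuel_string : String) (carlist : String) : List (String × Int) :=
  let fuel_levels : PySem.Dict String Int := PySem.Dict.empty
  let fuel_levels :=
    if fuel_string = "" then fuel_levels
    else
      let fuel_list := (PySem.Chars.split? fuel_string.toList [' ']).getD []
      fuel_list.foldl (fun d fuel => d.insert (tokCar fuel) (tokVal fuel)) fuel_levels
  let fuel_levels := carlist.toList.foldl
    (fun d car => if d.contains (chKey car) then d else d.insert (chKey car) 100) fuel_levels
  fuel_levels.items

-- ===== PORT B =====
-- value(c) of Source B: 100 for a car absent from the fuel string, else the last token naming it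
def bValue (tokens : List (List Char)) (cars : List String) (c : String) : Int :=
  if c ∈ cars then
    match tokens.reverse.find? (fun u => tokCar u == c) with
    | some t => tokVal t
    | none => 100
  else 100

def get_fuel_dict_py_alt (fuel_string : String) (carlist : String) : List (String × Int) :=
  let tokens := if fuel_string = "" then [] else (PySem.Chars.split? fuel_string.toList [' ']).getD []
  let cars := tokens.map tokCar
  let keys : PySem.Set String := PySem.Set.ofList (cars ++ carlist.toList.map chKey)
  keys.map (fun c => (c, bValue tokens cars c))

-- ===== PRECONDITION & SPEC =====
-- Pre_ excludes exactly the inputs where the Python A raises: a nonempty fuel_string one of whose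
-- space-split tokens is empty (IndexError on token[0]) or has a tail int() cannot parse (ValueError).
def Pre_get_fuel_dict_py (fuel_string : String) (carlist : String) : Prop :=
  fuel_string ≠ "" →
    ∀ t ∈ (PySem.Chars.split? fuel_string.toList [' ']).getD [],
      t ≠ [] ∧ (t.drop 1 = [] ∨ (PySem.Int.ofChars? (t.drop 1)).isSome = true)
instance (fuel_string : String) (carlist : String) : Decidable (Pre_get_fuel_dict_py fuel_string carlist) := by
  unfold Pre_get_fuel_dict_py; infer_instance

def pvWitness_get_fuel_dict_py : String × String := ("a10 b", "abc")

def Spec_get_fuel_dict_py (fuel_string : String) (carlist : String) (out : List (String × Int)) : Prop := out = get_fuel_dict_py_alt fuel_string carlist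
instance (fuel_string : String) (carlist : String) (out : List (String × Int)) : Decidable (Spec_get_fuel_dict_py fuel_string carlist out) := by unfold Spec_get_fuel_dict_py; infer_instance

-- ===== CLAIM (what is proved, stated in full; the proofs are below) =====
def Claim_equal_get_fuel_dict_py : Prop := ∀ (fuel_string : String) (carlist : String), Dom_get_fuel_dict_py fuel_string carlist → Pre_get_fuel_dict_py fuel_string carlist → Spec_get_fuel_dict_py fuel_string carlist (get_fuel_dict_py fuel_string carlist)

-- ===== LEMMAS AND PROOFS =====

theorem pvWitness_ok :
    Dom_get_fuel_dict_py pvWitness_get_fuel_dict_py.1 pvWitness_get_fuel_dict_py.2 ∧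
    Pre_get_fuel_dict_py pvWitness_get_fuel_dict_py.1 pvWitness_get_fuel_dict_py.2 := by decide

-- lookup in the dict built by A's token loop: the last token naming the car wins
theorem get?_tokfold (tokens : List (List Char)) (d : PySem.Dict String Int) (k : String) :
    (tokens.foldl (fun d t => d.insert (tokCar t) (tokVal t)) d).get? k
      = match tokens.reverse.find? (fun u => tokCar u == k) with
        | some t => some (tokVal t)
        | none => d.get? k := by
  induction tokens generalizing d with
  | nil => simp
  | cons t ts ih =>
    simp only [List.foldl_cons, List.reverse_cons, List.find?_append, ih]
    cases h : ts.reverse.find? (fun u => tokCar u == k) with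
    | some u => simp [Option.or]
    | none =>
      simp only [Option.or, List.find?_cons, List.find?_nil]
      by_cases hk : tokCar t = k
      · subst hk; simp
      · simp [beq_eq_false_iff_ne.mpr hk]
        rw [PySem.Dict.get?_insert, if_neg (Ne.symm hk)]

-- lookup in the dict after A's carlist loop: an existing binding is kept, a missing car gets 100
theorem get?_clfold (cs : List Char) (d : PySem.Dict String Int) (k : String) :
    (cs.foldl (fun d c => if d.contains (chKey c) then d else d.insert (chKey c) 100) d).get? k
      = match d.get? k with
        | some v => some v
        | none => if k ∈ cs.map chKey then some 100 else none := by
  induction cs generalizing d with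
  | nil => cases h : d.get? k <;> simp [h]
  | cons c cs ih =>
    simp only [List.foldl_cons]
    by_cases hc : d.contains (chKey c) = true
    · rw [if_pos hc, ih]
      cases h : d.get? k with
      | some v => rfl
      | none =>
        have hk : k ≠ chKey c := by
          intro hkc
          rw [PySem.Dict.contains_eq_isSome_get?, ← hkc, h] at hc
          simp at hc
        simp [hk]
    · rw [if_neg hc, ih, PySem.Dict.get?_insert]
      by_cases hk : k = chKey c
      · subst hk
        have hnone : d.get? (chKey c) = none := by
          have hco := PySem.Dict.contains_eq_isSome_get? d (chKey c)
          cases h : d.get? (chKey c) with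
          | none => rfl
          | some v => rw [h] at hco; simp [hco] at hc
        simp [hnone]
      · rw [if_neg hk]
        cases h : d.get? k <;> simp [hk]

-- keys after A's carlist loop: the missing cars are appended in first-occurrence order
theorem keys_clfold (cs : List Char) (d : PySem.Dict String Int) :
    (cs.foldl (fun d c => if d.contains (chKey c) then d else d.insert (chKey c) 100) d).keys
      = PySem.Set.update d.keys (cs.map chKey) := by
  induction cs generalizing d with
  | nil => rfl
  | cons c cs ih =>
    simp only [List.foldl_cons, List.map_cons]
    have hstep : PySem.Set.update d.keys (chKey c :: cs.map chKey)
        = PySem.Set.update (PySem.Set.add d.keys (chKey c)) (cs.map chKey) := rfl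
    rw [hstep]
    by_cases hc : d.contains (chKey c) = true
    · rw [if_pos hc, ih]
      congr 1
      simp [PySem.Set.add]
      exact (PySem.Dict.contains_iff_mem_keys d (chKey c)).mp hc
    · rw [if_neg hc, ih, PySem.Dict.keys_insert_of_not_contains d 100 (by simpa using hc)]
      congr 1
      simp [PySem.Set.add]
      exact fun hm => hc ((PySem.Dict.contains_iff_mem_keys d (chKey c)).mpr hm)

theorem update_ofList {α : Type} [BEq α] (xs ys : List α) :
    PySem.Set.update (PySem.Set.ofList xs) ys = PySem.Set.ofList (xs ++ ys) := by
  rw [PySem.Set.ofList_eq_foldl, PySem.Set.ofList_eq_foldl, List.foldl_append]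
  rfl

-- ===== VERDICT (by name: the statement is the Claim_ definition above) =====
theorem get_fuel_dict_py_spec : Claim_equal_get_fuel_dict_py := by
  intro fuel_string carlist _ _
  unfold Spec_get_fuel_dict_py get_fuel_dict_py get_fuel_dict_py_alt
  simp only []
  set tokens := if fuel_string = "" then ([] : List (List Char))
    else (PySem.Chars.split? fuel_string.toList [' ']).getD [] with htokens
  set cars := tokens.map tokCar with hcars
  -- A's two folds, written uniformly over `tokens`
  have hA : (if fuel_string = "" then (PySem.Dict.empty : PySem.Dict String Int)
      else ((PySem.Chars.split? fuel_string.toList [' ']).getD []).foldl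
        (fun d fuel => d.insert (tokCar fuel) (tokVal fuel)) PySem.Dict.empty)
      = tokens.foldl (fun d t => d.insert (tokCar t) (tokVal t)) PySem.Dict.empty := by
    by_cases h : fuel_string = "" <;> simp [htokens, h]
  rw [hA]
  set d1 := tokens.foldl (fun d t => d.insert (tokCar t) (tokVal t)) PySem.Dict.empty with hd1
  set d2 := carlist.toList.foldl
    (fun d c => if d.contains (chKey c) then d else d.insert (chKey c) 100) d1 with hd2
  have hnd1 : d1.keys.Nodup := by
    rw [hd1]
    exact PySem.Dict.nodup_keys_foldl_insert_key tokens tokCar (fun _ t => tokVal t)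
      PySem.Dict.empty (by simp [PySem.Dict.keys_empty])
  have hk1 : d1.keys = PySem.Set.ofList cars := by
    rw [hd1, PySem.Dict.keys_foldl_insert_key tokens tokCar (fun _ t => tokVal t)]
    rw [PySem.Dict.keys_empty, hcars, PySem.Set.ofList_eq_foldl]
    rfl
  have hk2 : d2.keys = PySem.Set.ofList (cars ++ carlist.toList.map chKey) := by
    rw [hd2, keys_clfold, hk1, update_ofList]
  have hnd2 : d2.keys.Nodup := by
    rw [hk2]; exact PySem.Set.nodup_ofList _
  rw [PySem.Dict.items_eq_map_keys d2 hnd2 0, hk2]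
  apply List.map_congr_left
  intro k hk
  have hk' : k ∈ cars ∨ k ∈ carlist.toList.map chKey := by
    have := (PySem.Set.mem_ofList _ k).mp hk
    simpa using this
  have hget1 : d1.get? k = match tokens.reverse.find? (fun u => tokCar u == k) with
      | some t => some (tokVal t)
      | none => none := by
    rw [hd1, get?_tokfold]
    cases tokens.reverse.find? (fun u => tokCar u == k) <;> simp
  refine Prod.ext rfl ?_
  show d2.getD k 0 = bValue tokens cars k
  rw [PySem.Dict.getD_eq_get?_getD, hd2, get?_clfold, hget1]
  unfold bValue
  by_cases hc : k ∈ cars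
  · rw [if_pos hc]
    have hex : (tokens.reverse.find? (fun u => tokCar u == k)).isSome = true := by
      rw [List.find?_isSome]
      obtain ⟨t, ht, htk⟩ := List.mem_map.mp (hcars ▸ hc)
      exact ⟨t, List.mem_reverse.mpr ht, by simp [htk]⟩
    obtain ⟨u, hu⟩ := Option.isSome_iff_exists.mp hex
    rw [hu]
    rfl
  · rw [if_neg hc]
    have hnone : tokens.reverse.find? (fun u => tokCar u == k) = none := by
      rw [List.find?_eq_none]
      intro u hu hbeq
      exact hc (hcars ▸ List.mem_map.mpr ⟨u, List.mem_reverse.mp hu, eq_of_beq hbeq⟩)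
    rw [hnone]
    have hmem : k ∈ carlist.toList.map chKey := hk'.resolve_left hc
    simp [hmem]
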